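-- pv_equiv track=rewrite | github.com/HauntedPineapple/CodingChallenges | Python/Schoty-Abacus.py | readSchoty
-- ===== SOURCE A (Python) =====
-- def readSchoty(abacus):
--     """
--     'abacus' is a list of 7 strings representing the abacus from top to bottom
--     """
--     unitFactor = 1
--     value = 0
--     count = 0
--
--     i = 7
--     while i > 0:
--         i -= 1
--
--         beads = abacus[i].split('-')
--
--         for j in range(0, len(beads[0])):
--             if beads[0][j] == "O":
--                 count += 1
--
--         value += count*unitFactor
--         count = 0
--         unitFactor *= 10
--
--     return value
--     # for (int i = 6; i > -1; i--)
--     #         {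
--     #             string[] beads = abacus[i].Split('-')
--     #             for (int a = 0; a < beads[0].Length; a++)
--     #             {
--     #                 if(beads[0][a]=='O')
--     #                 {
--     #                     count++
--     #                 }
--     #             }
--     #             value += count * unitFactor
--     #             count = 0
--     #             unitFactor *= 10
--     #         }
--     #         return value
--     pass
-- ===== SOURCE B (Python) =====
-- def _combine(ds):
--     # value of a digit list, divide and conquer: number = left * 10**len(right) + right
--     if len(ds) <= 1:
--         return ds[0]
--     mid = len(ds) // 2
--     return _combine(ds[:mid]) * 10 ** (len(ds) - mid) + _combine(ds[mid:])
--
-- def readSchoty(abacus):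
--     digits = [abacus[i].split('-')[0].count('O') for i in range(7)]
--     return _combine(digits)
-- ===== Notes on version B (the rewrite author's own statement) =====
-- stated objective: alternative
-- what changed: Two stages instead of A's single bottom-up while-loop: first a pass extracting the seven digits (str.count on the part before '-') into a list, then a divide-and-conquer combiner that assembles the number by splitting the digit list in half and scaling the left half by a power of ten, replacing A's running unitFactor accumulator and manual per-character counting loop.
import Mathlib
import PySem

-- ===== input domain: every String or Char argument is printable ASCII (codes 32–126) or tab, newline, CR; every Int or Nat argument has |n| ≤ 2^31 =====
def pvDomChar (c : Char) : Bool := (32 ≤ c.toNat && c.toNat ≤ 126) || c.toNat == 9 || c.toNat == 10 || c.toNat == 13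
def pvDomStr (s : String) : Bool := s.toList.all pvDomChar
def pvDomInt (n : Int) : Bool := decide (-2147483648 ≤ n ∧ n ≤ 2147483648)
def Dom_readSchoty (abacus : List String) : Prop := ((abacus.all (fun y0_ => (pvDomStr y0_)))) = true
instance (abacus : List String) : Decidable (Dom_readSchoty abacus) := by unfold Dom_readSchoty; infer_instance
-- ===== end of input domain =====

-- B first extracts the seven digits into a list and then assembles the number by a
-- divide-and-conquer combiner on that list, instead of A's bottom-up unitFactor loop
-- with a manual per-character count (objective: alternative decomposition/algorithm).

-- ===== PORT A =====
-- 'for j in range(0, len(beads[0])): if beads[0][j] == "O": count += 1' — the index loop over the string's characters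
def pvCountRow (cs : List Char) : Int :=
  cs.foldl (fun count ch => if ch == 'O' then count + 1 else count) 0

-- 'i = 7; while i > 0: i -= 1; …' with state (unitFactor, value)
def readSchotyGo (abacus : List String) : Nat → Int → Int → Int
  | 0, _, value => value
  | i + 1, unitFactor, value =>
    let beads := ((PySem.Str.split? ((PySem.List.pyGet? abacus (Int.ofNat i)).getD "") "-").getD [])
    readSchotyGo abacus i (unitFactor * 10)
      (value + pvCountRow (beads.headD "").toList * unitFactor)

def readSchoty (abacus : List String) : Int := readSchotyGo abacus 7 1 0

-- ===== PORT B =====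
-- '_combine(ds)', recursion on halves of the digit list; the fuel argument (= ds.length
-- at the top call) only makes the recursion structural — the recursive calls are on
-- strictly shorter slices, so it is never exhausted.
def pvCombineGo : Nat → List Int → Int
  | 0, ds => (PySem.List.pyGet? ds 0).getD 0
  | fuel + 1, ds =>
    if (ds.length : Int) ≤ 1 then (PySem.List.pyGet? ds 0).getD 0
    else
      let mid := PySem.Int.floordiv (ds.length : Int) 2
      pvCombineGo fuel (PySem.List.slice ds none (some mid)) * 10 ^ ((ds.length : Int) - mid).toNat
        + pvCombineGo fuel (PySem.List.slice ds (some mid) none)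

def pvCombine (ds : List Int) : Int := pvCombineGo ds.length ds

-- "digits = [abacus[i].split('-')[0].count('O') for i in range(7)]; return _combine(digits)"
def readSchoty_alt (abacus : List String) : Int :=
  pvCombine ((PySem.List.pyRange 0 7).map
    (fun i => (PySem.Str.count (((PySem.Str.split? ((PySem.List.pyGet? abacus i).getD "") "-").getD []).headD "") "O" : Int)))

-- ===== PRECONDITION & SPEC =====
-- Python A raises IndexError when fewer than 7 rows are given; both programs read rows 0..6 only.
def Pre_readSchoty (abacus : List String) : Prop := 7 ≤ abacus.length
instance (abacus : List String) : Decidable (Pre_readSchoty abacus) := by unfold Pre_readSchoty; infer_instance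
def pvWitness_readSchoty : List String := ["O-", "OO-", "-", "OOO-", "-", "O-", "OOOOOOOOOO-"]

def Spec_readSchoty (abacus : List String) (out : Int) : Prop := out = readSchoty_alt abacus
instance (abacus : List String) (out : Int) : Decidable (Spec_readSchoty abacus out) := by unfold Spec_readSchoty; infer_instance

-- ===== CLAIM (what is proved, stated in full; the proofs are below) =====
def Claim_equal_readSchoty : Prop := ∀ (abacus : List String), Dom_readSchoty abacus → Pre_readSchoty abacus → Spec_readSchoty abacus (readSchoty abacus)

-- ===== LEMMAS AND PROOFS =====

theorem countO_go (fuel : Nat) (l : List Char) (acc : Nat) (h : l.length ≤ fuel) :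
    PySem.Chars.count.go ['O'] fuel l acc = acc + l.count 'O' := by
  induction fuel generalizing l acc with
  | zero =>
    cases l with
    | nil => simp [PySem.Chars.count.go]
    | cons a t => simp at h
  | succ f ih =>
    cases l with
    | nil => simp [PySem.Chars.count.go]
    | cons a t =>
      rw [PySem.Chars.count.go]
      have ht : t.length ≤ f := by simpa using h
      by_cases ha : 'O' = a
      · rw [if_pos (by simp [List.isPrefixOf]; exact ha)]
        simp [ih t _ ht, ← ha]
        omega
      · rw [if_neg (by simp [List.isPrefixOf]; exact ha)]
        rw [ih t acc ht, List.count_cons_of_ne (fun h' => ha h'.symm)]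

-- A's manual character loop and B's str.count compute the same digit
theorem rowEq (s : String) : pvCountRow s.toList = (PySem.Str.count s "O" : Int) := by
  have hc : PySem.Str.count s "O" = s.toList.count 'O' := by
    have h : PySem.Chars.count s.toList ['O'] = s.toList.count 'O' := by
      simp only [PySem.Chars.count, List.isEmpty]
      simpa using countO_go s.toList.length s.toList 0 le_rfl
    simpa using h
  rw [hc, pvCountRow]
  simpa using PySem.List.foldl_beq_add_one (l := s.toList) (v := 'O') (a := 0)

-- the digit of row i, as B computes it
def pvDigit (abacus : List String) (i : Int) : Int :=
  (PySem.Str.count (((PySem.Str.split? ((PySem.List.pyGet? abacus i).getD "") "-").getD []).headD "") "O" : Int)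

-- A's bottom-up loop equals uf times the Horner value of the first n digits
theorem goEq (abacus : List String) (n : Nat) (uf v : Int) :
    readSchotyGo abacus n uf v =
      v + uf * (PySem.List.pyRange 0 (n : Int)).foldl
        (fun value i => value * 10 + pvDigit abacus i) 0 := by
  induction n generalizing uf v with
  | zero => simp [readSchotyGo, PySem.List.pyRange]
  | succ m ih =>
    rw [readSchotyGo, ih]
    rw [show ((m + 1 : Nat) : Int) = (m : Int) + 1 by push_cast; ring,
      PySem.List.pyRange_one_succ_right (by positivity),
      List.foldl_append]
    simp only [List.foldl]
    rw [rowEq]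
    show _ + pvDigit abacus (Int.ofNat m) * uf + _ = _
    simp only [Int.ofNat_eq_natCast]
    ring

-- B's combiner unfolded on slices of each concrete length it meets
theorem go_one (fuel : Nat) (a : Int) : pvCombineGo (fuel + 1) [a] = a := by
  rw [pvCombineGo]; norm_num

theorem go_two (fuel : Nat) (a b : Int) : pvCombineGo (fuel + 2) [a, b] = a * 10 + b := by
  rw [pvCombineGo]
  norm_num [show Int.toNat 1 = 1 from rfl, show PySem.Int.floordiv 2 2 = 1 from by decide,
    PySem.List.slice_to [a, b] (show (0:Int) ≤ 1 from by norm_num),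
    PySem.List.slice_from [a, b] (show (0:Int) ≤ 1 from by norm_num), go_one]

theorem go_three (fuel : Nat) (a b c : Int) :
    pvCombineGo (fuel + 3) [a, b, c] = a * 100 + (b * 10 + c) := by
  rw [pvCombineGo]
  norm_num [show Int.toNat 2 = 2 from rfl, show Int.toNat 1 = 1 from rfl,
    show PySem.Int.floordiv 3 2 = 1 from by decide,
    PySem.List.slice_to [a, b, c] (show (0:Int) ≤ 1 from by norm_num),
    PySem.List.slice_from [a, b, c] (show (0:Int) ≤ 1 from by norm_num),
    (go_one (fuel + 1) a : pvCombineGo (fuel + 2) [a] = a), go_two]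

theorem go_four (fuel : Nat) (a b c d : Int) :
    pvCombineGo (fuel + 4) [a, b, c, d] = (a * 10 + b) * 100 + (c * 10 + d) := by
  rw [pvCombineGo]
  norm_num [show Int.toNat 2 = 2 from rfl, show PySem.Int.floordiv 4 2 = 2 from by decide,
    PySem.List.slice_to [a, b, c, d] (show (0:Int) ≤ 2 from by norm_num),
    PySem.List.slice_from [a, b, c, d] (show (0:Int) ≤ 2 from by norm_num),
    (go_two (fuel + 1) : ∀ x y : Int, pvCombineGo (fuel + 3) [x, y] = x * 10 + y)]

-- B's combiner on the seven-digit list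
theorem combine7 (d0 d1 d2 d3 d4 d5 d6 : Int) :
    pvCombine [d0, d1, d2, d3, d4, d5, d6] =
      (d0 * 100 + (d1 * 10 + d2)) * 10000 + ((d3 * 10 + d4) * 100 + (d5 * 10 + d6)) := by
  show pvCombineGo 7 [d0, d1, d2, d3, d4, d5, d6] = _
  rw [pvCombineGo]
  norm_num [show Int.toNat 3 = 3 from rfl, show Int.toNat 4 = 4 from rfl,
    show PySem.Int.floordiv 7 2 = 3 from by decide,
    PySem.List.slice_to [d0,d1,d2,d3,d4,d5,d6] (show (0:Int) ≤ 3 from by norm_num),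
    PySem.List.slice_from [d0,d1,d2,d3,d4,d5,d6] (show (0:Int) ≤ 3 from by norm_num),
    (go_three 3 d0 d1 d2 : pvCombineGo 6 [d0, d1, d2] = _),
    (go_four 2 d3 d4 d5 d6 : pvCombineGo 6 [d3, d4, d5, d6] = _)]

-- ===== VERDICT (by name: the statement is the Claim_ definition above) =====
theorem readSchoty_spec : Claim_equal_readSchoty := by
  intro abacus _ _
  show readSchoty abacus = readSchoty_alt abacus
  rw [readSchoty, goEq]
  have hr : PySem.List.pyRange 0 ((7 : Nat) : Int) = [0, 1, 2, 3, 4, 5, 6] := by decide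
  rw [hr, readSchoty_alt]
  have hr' : PySem.List.pyRange 0 7 = [0, 1, 2, 3, 4, 5, 6] := by decide
  rw [hr']
  simp only [List.map, List.foldl]
  rw [combine7]
  simp only [pvDigit]
  ring
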